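-- pv_equiv track=rewrite | github.com/RemcoCoppens/DRLMOEA | Generic_Model/Agent_Classes/DuelingDQN_Agent.py | create_action_space
-- ===== SOURCE A (Python) =====
-- def create_action_space(as1, as2, as3):
--     """Create the action space for the agent using all combinations of the
--     indivual action spaces of the three variables."""
--     #COMMENT: KIJKEN OF WE COMBINATIES WILLEN OF LOS VAN ELKAAR, Reijnen heeft volgens mij los
--     #van elkaar maar dat weet ik niet zeker
--     """Input:
--             - as1: The list of possible actions for the crossover distrubution parameter
--             - as2: The list of possible actions for the mutation distrubution parameter
--             - as3: The list of possible actions for the independent mutation probability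
--     """
--     action_space = []
--     for i in as1:
--         for j in as2:
--             for k in as3:
--                 action_space.append([i,j,k])
--     return action_space
-- ===== SOURCE B (Python) =====
-- def create_action_space(as1, as2, as3):
--     """Create the action space for the agent using all combinations of the
--     indivual action spaces of the three variables."""
--     result = [[]]
--     for lst in (as1, as2, as3):
--         result = [prefix + [x] for prefix in result for x in lst]
--     return result
-- ===== Notes on version B (the rewrite author's own statement) =====
-- stated objective: alternative
-- what changed: Replaces the three fixed nested loops with a left fold over the list of dimensions, extending a growing list of partial prefixes by one element per dimension.
import Mathlib
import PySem

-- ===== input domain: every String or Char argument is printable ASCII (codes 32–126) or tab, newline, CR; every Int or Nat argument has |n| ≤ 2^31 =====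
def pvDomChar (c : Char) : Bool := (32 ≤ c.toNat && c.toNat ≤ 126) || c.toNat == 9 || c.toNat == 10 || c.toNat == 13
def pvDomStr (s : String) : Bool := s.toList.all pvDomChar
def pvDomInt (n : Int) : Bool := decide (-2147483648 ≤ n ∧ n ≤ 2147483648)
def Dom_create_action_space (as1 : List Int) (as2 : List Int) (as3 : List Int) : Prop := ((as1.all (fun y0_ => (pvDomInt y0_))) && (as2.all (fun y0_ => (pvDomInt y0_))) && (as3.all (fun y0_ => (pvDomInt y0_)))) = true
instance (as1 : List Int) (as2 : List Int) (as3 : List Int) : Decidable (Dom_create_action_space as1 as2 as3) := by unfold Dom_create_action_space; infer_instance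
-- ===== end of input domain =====

-- B is an alternative decomposition: a fold over the list of dimensions extending partial prefixes,
-- instead of A's three fixed nested loops (same output, same cost).

-- ===== PORT A =====
-- three nested loops appending [i, j, k] to an accumulator
def create_action_space (as1 : List Int) (as2 : List Int) (as3 : List Int) : List (List Int) :=
  as1.foldl (fun acc i =>
    as2.foldl (fun acc j =>
      as3.foldl (fun acc k => acc ++ [[i, j, k]]) acc) acc) []

-- ===== PORT B =====
-- fold over the list of dimensions; each step extends every prefix by every element of the dimension
def create_action_space_alt (as1 : List Int) (as2 : List Int) (as3 : List Int) : List (List Int) :=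
  [as1, as2, as3].foldl
    (fun result lst => result.flatMap (fun pre => lst.map (fun x => pre ++ [x])))
    [[]]

-- ===== PRECONDITION & SPEC =====
def Spec_create_action_space (as1 : List Int) (as2 : List Int) (as3 : List Int) (out : List (List Int)) : Prop := out = create_action_space_alt as1 as2 as3
instance (as1 : List Int) (as2 : List Int) (as3 : List Int) (out : List (List Int)) : Decidable (Spec_create_action_space as1 as2 as3 out) := by unfold Spec_create_action_space; infer_instance

-- ===== CLAIM (what is proved, stated in full; the proofs are below) =====
def Claim_equal_create_action_space : Prop := ∀ (as1 : List Int) (as2 : List Int) (as3 : List Int), Dom_create_action_space as1 as2 as3 → Spec_create_action_space as1 as2 as3 (create_action_space as1 as2 as3)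

-- ===== LEMMAS AND PROOFS =====

-- an append-accumulating foldl is init ++ flatMap
theorem foldl_append_singleton_flatMap {α β : Type} (xs : List α) (g : α → List β) (init : List β) :
    xs.foldl (fun acc x => acc ++ g x) init = init ++ xs.flatMap g := by
  induction xs generalizing init with
  | nil => simp
  | cons x xs ih => simp [List.foldl, ih, List.append_assoc]

theorem create_action_space_flat (as1 as2 as3 : List Int) :
    create_action_space as1 as2 as3 =
      as1.flatMap (fun i => as2.flatMap (fun j => as3.map (fun k => [i, j, k]))) := by
  unfold create_action_space
  have h3 : ∀ (i j : Int) (acc : List (List Int)),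
      as3.foldl (fun acc k => acc ++ [[i, j, k]]) acc
        = acc ++ as3.map (fun k => [i, j, k]) := by
    intro i j acc
    rw [foldl_append_singleton_flatMap as3 (fun k => [[i, j, k]]) acc]
    congr 1
    induction as3 with
    | nil => rfl
    | cons k ks ih => simp_all [List.flatMap]
  simp only [h3]
  have h2 : ∀ (i : Int) (acc : List (List Int)),
      as2.foldl (fun acc j => acc ++ as3.map (fun k => [i, j, k])) acc
        = acc ++ as2.flatMap (fun j => as3.map (fun k => [i, j, k])) := by
    intro i acc
    exact foldl_append_singleton_flatMap as2 _ acc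
  simp only [h2]
  have h1 := foldl_append_singleton_flatMap as1
    (fun i => as2.flatMap (fun j => as3.map (fun k => [i, j, k]))) []
  simpa using h1

theorem create_action_space_alt_flat (as1 as2 as3 : List Int) :
    create_action_space_alt as1 as2 as3 =
      as1.flatMap (fun i => as2.flatMap (fun j => as3.map (fun k => [i, j, k]))) := by
  unfold create_action_space_alt
  show ((([[]] : List (List Int)).flatMap fun pre => as1.map (fun x => pre ++ [x])).flatMap
      fun pre => as2.map (fun x => pre ++ [x])).flatMap (fun pre => as3.map (fun x => pre ++ [x]))
    = _
  simp [List.flatMap_map, List.flatMap_assoc]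

-- ===== VERDICT (by name: the statement is the Claim_ definition above) =====
theorem create_action_space_spec : Claim_equal_create_action_space := by
  intro as1 as2 as3 _
  unfold Spec_create_action_space
  rw [create_action_space_flat, create_action_space_alt_flat]
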